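-- pv_equiv track=rewrite | github.com/beatussum/polygon | gen_many_points.py | false_inclusions
-- ===== SOURCE A (Python) =====
-- from copy import deepcopy
--
-- def false_inclusions(n):
--     polys = [None for i in range(n)]
--     current = [[0, 0], [2, 0], [2, 1], [1, 1], [1, 2], [2, 2], [2, 3], [0, 3]]
--     polys[0] = current
--     for i in range(1, n):
--         current = deepcopy(current)
--         current[0][0] -= 2
--         current[0][1] -= 2
--         current[1][0] += 1
--         current[1][1] -= 2
--         current[2][0] += 1
--         current[2][1] -= 2
--         current[3][0] -= 2
--         current[3][1] -= 2
--         current[4][0] -= 2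
--         current[4][1] += 2
--         current[5][0] += 1
--         current[5][1] += 2
--         current[6][0] += 1
--         current[6][1] += 2
--         current[7][0] -= 2
--         current[7][1] += 2
--         polys[i] = current
--     return polys
-- ===== SOURCE B (Python) =====
-- def false_inclusions(n):
--     base = [[0, 0], [2, 0], [2, 1], [1, 1], [1, 2], [2, 2], [2, 3], [0, 3]]
--     dx = [-2, 1, 1, -2, -2, 1, 1, -2]
--     dy = [-2, -2, -2, -2, 2, 2, 2, 2]
--     return [[[base[j][0] + i * dx[j], base[j][1] + i * dy[j]] for j in range(8)]
--             for i in range(n)]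
-- ===== Notes on version B (the rewrite author's own statement) =====
-- stated objective: simpler
-- what changed: Replaces the sequential deepcopy-and-mutate loop (each polygon derived from the previous one by 16 in-place increments) with a closed-form double comprehension: polygon i is the base octagon plus i times fixed per-vertex deltas, removing deepcopy, preallocation and the sequential dependency.
-- outside the precondition, e.g. on false_inclusions(0): A raises IndexError, B returns []
import Mathlib
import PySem

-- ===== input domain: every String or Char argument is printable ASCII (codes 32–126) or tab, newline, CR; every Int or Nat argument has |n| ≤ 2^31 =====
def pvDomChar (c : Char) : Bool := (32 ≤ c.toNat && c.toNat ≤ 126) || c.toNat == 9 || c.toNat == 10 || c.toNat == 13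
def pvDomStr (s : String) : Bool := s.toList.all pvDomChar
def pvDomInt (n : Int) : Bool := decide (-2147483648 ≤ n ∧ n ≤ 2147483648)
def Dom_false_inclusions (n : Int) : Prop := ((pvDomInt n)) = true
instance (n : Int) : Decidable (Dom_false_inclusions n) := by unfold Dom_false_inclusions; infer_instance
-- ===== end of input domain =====

-- B replaces A's sequential deepcopy-and-mutate loop by a closed-form comprehension
-- (polygon i = base octagon + i · fixed per-vertex deltas); objective: simpler.

-- ===== PORT A =====
-- the sixteen in-place 'current[j][k] ±= d' mutations of A's loop body, in order
def pvAStep (c : List (List Int)) : List (List Int) :=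
  let c := c.modify 0 (fun r => r.modify 0 (· - 2))
  let c := c.modify 0 (fun r => r.modify 1 (· - 2))
  let c := c.modify 1 (fun r => r.modify 0 (· + 1))
  let c := c.modify 1 (fun r => r.modify 1 (· - 2))
  let c := c.modify 2 (fun r => r.modify 0 (· + 1))
  let c := c.modify 2 (fun r => r.modify 1 (· - 2))
  let c := c.modify 3 (fun r => r.modify 0 (· - 2))
  let c := c.modify 3 (fun r => r.modify 1 (· - 2))
  let c := c.modify 4 (fun r => r.modify 0 (· - 2))
  let c := c.modify 4 (fun r => r.modify 1 (· + 2))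
  let c := c.modify 5 (fun r => r.modify 0 (· + 1))
  let c := c.modify 5 (fun r => r.modify 1 (· + 2))
  let c := c.modify 6 (fun r => r.modify 0 (· + 1))
  let c := c.modify 6 (fun r => r.modify 1 (· + 2))
  let c := c.modify 7 (fun r => r.modify 0 (· - 2))
  let c := c.modify 7 (fun r => r.modify 1 (· + 2))
  c

-- loop body: 'current = deepcopy(current); …mutations…; polys[i] = current'
def pvALoop (st : List (List Int) × List (Option (List (List Int)))) (i : Int) :
    List (List Int) × List (Option (List (List Int))) :=
  let c := pvAStep st.1
  (c, st.2.set i.toNat (some c))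

def false_inclusions (n : Int) : List (List (List Int)) :=
  let polys : List (Option (List (List Int))) := (List.range n.toNat).map (fun _ => none)
  let current : List (List Int) := [[0, 0], [2, 0], [2, 1], [1, 1], [1, 2], [2, 2], [2, 3], [0, 3]]
  let polys := polys.set 0 (some current)
  let st := (PySem.List.pyRange 1 n 1).foldl pvALoop (current, polys)
  st.2.map (fun o => o.getD [])

-- ===== PORT B =====
def false_inclusions_alt (n : Int) : List (List (List Int)) :=
  let base : List (List Int) := [[0, 0], [2, 0], [2, 1], [1, 1], [1, 2], [2, 2], [2, 3], [0, 3]]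
  let dx : List Int := [-2, 1, 1, -2, -2, 1, 1, -2]
  let dy : List Int := [-2, -2, -2, -2, 2, 2, 2, 2]
  (PySem.List.pyRange 0 n 1).map (fun i =>
    (PySem.List.pyRange 0 8 1).map (fun j =>
      [PySem.List.pyGetD (PySem.List.pyGetD base j []) 0 0 + i * PySem.List.pyGetD dx j 0,
       PySem.List.pyGetD (PySem.List.pyGetD base j []) 1 0 + i * PySem.List.pyGetD dy j 0]))

-- ===== PRECONDITION & SPEC =====
-- Pre_ excludes n ≤ 0, on which A raises IndexError at 'polys[0] = current'.
def Pre_false_inclusions (n : Int) : Prop := 1 ≤ n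
instance (n : Int) : Decidable (Pre_false_inclusions n) := by unfold Pre_false_inclusions; infer_instance
def pvWitness_false_inclusions : Int := (3)

def Spec_false_inclusions (n : Int) (out : List (List (List Int))) : Prop := out = false_inclusions_alt n
instance (n : Int) (out : List (List (List Int))) : Decidable (Spec_false_inclusions n out) := by unfold Spec_false_inclusions; infer_instance

-- ===== CLAIM (what is proved, stated in full; the proofs are below) =====
def Claim_equal_false_inclusions : Prop := ∀ (n : Int), Dom_false_inclusions n → Pre_false_inclusions n → Spec_false_inclusions n (false_inclusions n)

-- ===== LEMMAS AND PROOFS =====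

-- closed form of polygon i
def pvF (i : Int) : List (List Int) :=
  [[-2 * i, -2 * i], [2 + i, -2 * i], [2 + i, 1 - 2 * i], [1 - 2 * i, 1 - 2 * i],
   [1 - 2 * i, 2 + 2 * i], [2 + i, 2 + 2 * i], [2 + i, 3 + 2 * i], [-2 * i, 3 + 2 * i]]

theorem pvF_zero : pvF 0 = [[0, 0], [2, 0], [2, 1], [1, 1], [1, 2], [2, 2], [2, 3], [0, 3]] := by
  simp [pvF]

theorem pvAStep_pvF (i : Int) : pvAStep (pvF i) = pvF (i + 1) := by
  simp [pvAStep, pvF]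
  and_intros <;> first | trivial | ring

theorem alt_eq_map_pvF (n : Int) : false_inclusions_alt n = (PySem.List.pyRange 0 n 1).map pvF := by
  unfold false_inclusions_alt
  refine List.map_congr_left (fun i _ => ?_)
  have h8 : PySem.List.pyRange 0 8 1 = [0, 1, 2, 3, 4, 5, 6, 7] := by decide
  rw [h8]
  simp [PySem.List.pyGetD, pvF]
  and_intros <;> first | trivial | ring

-- the successive 'polys[i] = current' assignments of A's loop
def pvSets (P : List (Option (List (List Int)))) : Nat → List (Option (List (List Int)))
  | 0 => P
  | m + 1 => (pvSets P m).set (m + 1) (some (pvF (m + 1)))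

theorem pvSets_length (P : List (Option (List (List Int)))) (m : Nat) :
    (pvSets P m).length = P.length := by
  induction m with
  | zero => rfl
  | succ m ih => simp [pvSets, ih]

theorem pvSets_getElem (P : List (Option (List (List Int)))) (m k : Nat) (hk : k < P.length)
    (hk' : k < (pvSets P m).length) :
    (pvSets P m)[k] = if 1 ≤ k ∧ k ≤ m then some (pvF k) else P[k] := by
  induction m with
  | zero => simp [pvSets]; omega
  | succ m ih =>
    simp only [pvSets, List.getElem_set]
    by_cases h : m + 1 = k
    · subst h; simp
    · rw [if_neg h, ih (by simpa [pvSets_length] using hk)]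
      have : (1 ≤ k ∧ k ≤ m) ↔ (1 ≤ k ∧ k ≤ m + 1) := by omega
      simp [this]

theorem pvFold (m : Nat) (P : List (Option (List (List Int)))) :
    (PySem.List.pyRange 1 (1 + (m : Int)) 1).foldl pvALoop (pvF 0, P) = (pvF m, pvSets P m) := by
  induction m with
  | zero => simp [PySem.List.pyRange_one_eq_nil, pvSets]
  | succ m ih =>
    have : (1 : Int) + ((m : Int) + 1) = (1 + (m : Int)) + 1 := by ring
    rw [Nat.cast_add, Nat.cast_one, this, PySem.List.pyRange_one_succ_right (by omega),
      List.foldl_append, ih]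
    simp only [List.foldl_cons, List.foldl_nil, pvALoop, pvAStep_pvF]
    have ht : ((1 : Int) + (m : Int)).toNat = m + 1 := by omega
    have hc : ((m : Int) + 1) = (1 : Int) + (m : Int) := by ring
    simp [pvSets, ht, hc]

-- ===== VERDICT (by name: the statement is the Claim_ definition above) =====
theorem false_inclusions_spec : Claim_equal_false_inclusions := by
  intro n _ hn
  have hn : (1 : Int) ≤ n := hn
  obtain ⟨m, hm⟩ : ∃ m : Nat, n = 1 + (m : Int) := ⟨(n - 1).toNat, by omega⟩
  subst hm
  unfold Spec_false_inclusions false_inclusions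
  dsimp only
  rw [alt_eq_map_pvF, ← pvF_zero]
  set P : List (Option (List (List Int))) :=
    ((List.range ((1 : Int) + (m : Int)).toNat).map (fun _ => none)).set 0 (some (pvF 0)) with hP
  have hPlen : P.length = m + 1 := by
    simp only [hP, List.length_set, List.length_map, List.length_range]; omega
  rw [pvFold m P]
  apply List.ext_getElem
  · simp [pvSets_length, hPlen, PySem.List.length_pyRange_one]; omega
  · intro k h1 h2
    have hkP : k < P.length := by simpa [pvSets_length] using h1
    have hkm : k < m + 1 := by rwa [hPlen] at hkP
    simp only [List.getElem_map, PySem.List.getElem_pyRange_one]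
    rw [pvSets_getElem P m k hkP (by simpa [pvSets_length] using hkP)]
    by_cases hk0 : k = 0
    · subst hk0
      simp [hP]
    · rw [if_pos ⟨by omega, by omega⟩]
      simp
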